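-- pv_equiv track=rewrite | github.com/dylansloane/String-Validation | string_rules.py | rule4
-- ===== SOURCE A (Python) =====
-- def rule4(string):
--     #4: check if the string has no other period characters other than the last character
--     periodCounter = 0
--
--     #iteration
--     for character in string:
--
--         #count the number of periods
--         if character == '.':
--             periodCounter += 1
--
--     #create valid bool and check if valid
--     periodValid = False
--
--     #cannot be more than one
--     if periodCounter > 1:
--         periodValid = False
--
--     #make sure that if there is only one, it must be the end character
--     elif periodCounter == 1 and string[-1] == '.':
--         periodValid = True
--
--     #could be 0 if the string ends in '!' or '?'
--     elif periodCounter == 0: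
--         periodValid = True
--
--     #evaluate validity
--     if periodValid == True:
--         return True
--     else:
--         return False
-- ===== SOURCE B (Python) =====
-- def rule4(string):
--     # valid iff no '.' occurs before the last character
--     return '.' not in string[:-1]
-- ===== Notes on version B (the rewrite author's own statement) =====
-- stated objective: simpler
-- what changed: Replaces the period-counting loop and four-way branch chain by a single substring-membership test over the string with its last character removed.
import Mathlib
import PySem

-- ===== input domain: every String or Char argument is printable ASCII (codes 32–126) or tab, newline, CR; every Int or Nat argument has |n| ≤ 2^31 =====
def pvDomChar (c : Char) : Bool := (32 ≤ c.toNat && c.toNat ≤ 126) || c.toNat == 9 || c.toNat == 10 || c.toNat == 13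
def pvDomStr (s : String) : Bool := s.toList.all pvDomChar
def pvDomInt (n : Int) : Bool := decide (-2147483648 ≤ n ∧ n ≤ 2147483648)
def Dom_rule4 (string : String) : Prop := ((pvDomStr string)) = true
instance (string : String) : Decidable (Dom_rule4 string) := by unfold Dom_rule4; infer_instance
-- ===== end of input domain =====

-- B replaces A's period-counting loop and branch chain by one membership test on string[:-1] (simpler).

-- ===== PORT A =====
def rule4 (string : String) : Bool :=
  let periodCounter : Int :=
    string.toList.foldl (fun acc character => if character == '.' then acc + 1 else acc) 0
  let periodValid : Bool :=
    if periodCounter > 1 then false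
    else if periodCounter == 1 && (PySem.Str.pyGet? string (-1) == some '.') then true
    else if periodCounter == 0 then true
    else false
  if periodValid == true then true else false

-- ===== PORT B =====
def rule4_alt (string : String) : Bool :=
  !(PySem.Str.isIn "." (PySem.Str.slice string none (some (-1))))

-- ===== PRECONDITION & SPEC =====
def Spec_rule4 (string : String) (out : Bool) : Prop := out = rule4_alt string
instance (string : String) (out : Bool) : Decidable (Spec_rule4 string out) := by unfold Spec_rule4; infer_instance

-- ===== CLAIM (what is proved, stated in full; the proofs are below) =====
def Claim_equal_rule4 : Prop := ∀ (string : String), Dom_rule4 string → Spec_rule4 string (rule4 string)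

-- ===== LEMMAS AND PROOFS =====

theorem singleton_infix_iff {α : Type} (x : α) (l : List α) : [x] <:+: l ↔ x ∈ l := by
  constructor
  · intro h; exact h.mem (List.mem_singleton_self x)
  · intro h
    obtain ⟨pre, suf, rfl⟩ := List.append_of_mem h
    exact ⟨pre, suf, by simp⟩

theorem rule4_alt_eq (string : String) :
    rule4_alt string = !(string.toList.dropLast.contains '.') := by
  unfold rule4_alt
  have h : PySem.Str.isIn "." (PySem.Str.slice string none (some (-1)))
      = (string.toList.dropLast.contains '.') := by
    rw [Bool.eq_iff_iff, PySem.Str.isIn_iff_infix, PySem.Str.slice_to_neg_one]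
    show ("." : String).toList <:+: _ ↔ _
    rw [show ("." : String).toList = ['.'] from rfl, singleton_infix_iff, List.contains_iff_mem]
  rw [h]

theorem rule4_spec : Claim_equal_rule4 := by
  intro s _
  unfold Spec_rule4
  rw [rule4_alt_eq]
  unfold rule4
  simp only [PySem.List.foldl_beq_add_one, zero_add]
  rcases List.eq_nil_or_concat s.toList with h | ⟨init, last, h⟩
  · rw [h]; simp [PySem.Str.pyGet?, h]
  · rw [h]
    have hlast : PySem.Str.pyGet? s (-1) = some last := by
      rw [show PySem.Str.pyGet? s (-1) = PySem.List.pyGet? s.toList (-1) from by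
        simp [PySem.Str.pyGet?], h, List.concat_eq_append, PySem.List.pyGet?_neg_one_append_singleton]
    rw [hlast]
    simp only [List.concat_eq_append, List.count_append, List.count_singleton, List.dropLast_concat]
    by_cases hl : last = '.'
    · subst hl
      simp only [beq_self_eq_true, if_pos]
      by_cases hm : '.' ∈ init
      · have h1 : 1 ≤ init.count '.' := List.one_le_count_iff.mpr hm
        have : ((init.count '.' : Int) + 1 > 1) := by exact_mod_cast by omega
        simp [this, hm]
      · have h0 : init.count '.' = 0 := List.count_eq_zero.mpr hm
        simp [h0, hm]
    · have hne : (last == '.') = false := by simp [hl]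
      simp only [hne, Bool.false_eq_true, reduceIte, add_zero]
      by_cases hm : '.' ∈ init
      · have h1 : 1 ≤ init.count '.' := List.one_le_count_iff.mpr hm
        by_cases h2 : init.count '.' = 1
        · simp [h2, hm, hl]
        · have : ((init.count '.' : Int) > 1) := by exact_mod_cast by omega
          simp [this, hm]
      · have h0 : init.count '.' = 0 := List.count_eq_zero.mpr hm
        simp [h0, hm]
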